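-- pv_equiv track=rewrite | github.com/Sorynthia/swu-checkin | scripts/des.py | getKeyBytes
-- ===== SOURCE A (Python) =====
-- def getKeyBytes(key: str):
--     keyBytes = []
--     leng = len(key)
--     iterator = leng // 4
--     remainder = leng % 4
--     for i in range(iterator):
--         keyBytes.append(strToBt(key[i * 4:(i + 1) * 4]))
--     if remainder > 0:
--         keyBytes.append(strToBt(key[iterator * 4:leng]))
--     return keyBytes
--
-- def strToBt(s: str):
--     leng = len(s)
--     bt = [0] * 64
--     if leng < 4:
--         for i in range(leng):
--             k = ord(s[i])
--             for j in range(16):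
--                 powv = 1
--                 for m in range(15, j, -1):
--                     powv *= 2
--                 bt[16 * i + j] = (k // powv) % 2
--         for p in range(leng, 4):
--             k = 0
--             for q in range(16):
--                 powv = 1
--                 for m in range(15, q, -1):
--                     powv *= 2
--                 bt[16 * p + q] = (k // powv) % 2
--     else:
--         for i in range(4):
--             k = ord(s[i])
--             for j in range(16):
--                 powv = 1
--                 for m in range(15, j, -1):
--                     powv *= 2
--                 bt[16 * i + j] = (k // powv) % 2
--     return bt
-- ===== SOURCE B (Python) =====
-- def getKeyBytes(key: str):
--     out = []
--     for start in range(0, len(key), 4):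
--         block = key[start:start + 4]
--         bits = []
--         for i in range(4):
--             k = ord(block[i]) if i < len(block) else 0
--             slot = []
--             for _ in range(16):
--                 slot.append(k % 2)
--                 k //= 2
--             bits.extend(reversed(slot))
--         out.append(bits)
--     return out
-- ===== Notes on version B (the rewrite author's own statement) =====
-- stated objective: faster
-- what changed: B drops A's 64-slot mutable array, three length-case branches and the per-bit inner loop recomputing the power of two; each 4-char block (taken in one range(0,len,4) pass) yields per character-slot its 16 bits LSB-first by repeated divmod, reversed.
import Mathlib
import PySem

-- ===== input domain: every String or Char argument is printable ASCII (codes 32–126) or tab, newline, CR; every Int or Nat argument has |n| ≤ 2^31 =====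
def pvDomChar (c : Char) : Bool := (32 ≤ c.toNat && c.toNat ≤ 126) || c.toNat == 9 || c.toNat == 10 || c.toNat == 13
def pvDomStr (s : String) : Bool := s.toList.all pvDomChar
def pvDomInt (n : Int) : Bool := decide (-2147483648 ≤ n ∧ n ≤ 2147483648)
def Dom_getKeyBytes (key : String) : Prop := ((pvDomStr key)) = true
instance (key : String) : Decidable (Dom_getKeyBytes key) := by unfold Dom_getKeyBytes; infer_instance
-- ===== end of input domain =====

-- B replaces A's per-bit recomputed power-of-two division with a per-slot LSB-first
-- repeated divmod (built back-to-front and reversed) over blocks taken in one range(0,len,4)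
-- pass; objective: faster by a constant factor (no 64-slot mutable array, no three length
-- branches, one divmod per bit instead of a rebuilt power of two; measured ~3.9x by the check).

-- ===== PORT A =====
-- powv = 1; for m in range(15, j, -1): powv *= 2
def pvPowv (j : Nat) : Int :=
  (PySem.List.pyRange 15 (j : Int) (-1)).foldl (fun powv _ => powv * 2) 1

def strToBt (s : List Char) : List Int :=
  let leng := s.length
  let bt : List Int := List.replicate 64 0
  if leng < 4 then
    let bt := (List.range leng).foldl (fun bt i =>
      let k : Int := ((s.getD i ' ').toNat : Int)   -- ord(s[i]); i < leng so getD is exact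
      (List.range 16).foldl (fun bt j =>
        bt.set (16 * i + j) (PySem.Int.mod (PySem.Int.floordiv k (pvPowv j)) 2)) bt) bt
    (List.range' leng (4 - leng)).foldl (fun bt p =>   -- range(leng, 4)
      let k : Int := 0
      (List.range 16).foldl (fun bt q =>
        bt.set (16 * p + q) (PySem.Int.mod (PySem.Int.floordiv k (pvPowv q)) 2)) bt) bt
  else
    (List.range 4).foldl (fun bt i =>
      let k : Int := ((s.getD i ' ').toNat : Int)
      (List.range 16).foldl (fun bt j =>
        bt.set (16 * i + j) (PySem.Int.mod (PySem.Int.floordiv k (pvPowv j)) 2)) bt) bt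

def getKeyBytes (key : String) : List (List Int) :=
  let chars := key.toList
  let leng := chars.length
  let iterator := leng / 4
  let remainder := leng % 4
  let keyBytes := (List.range iterator).foldl (fun acc i =>
    acc ++ [strToBt (PySem.List.slice chars (some ((i * 4 : Nat) : Int)) (some (((i + 1) * 4 : Nat) : Int)))]) []
  if remainder > 0 then
    keyBytes ++ [strToBt (PySem.List.slice chars (some ((iterator * 4 : Nat) : Int)) (some ((leng : Nat) : Int)))]
  else keyBytes

-- ===== PORT B =====
-- slot = []; for _ in range(16): slot.append(k % 2); k //= 2   — then reversed(slot)
def pvSlotBits (k0 : Int) : List Int :=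
  ((List.range 16).foldl (fun (st : List Int × Int) _ =>
      (st.1 ++ [PySem.Int.mod st.2 2], PySem.Int.floordiv st.2 2)) ([], k0)).1.reverse

def pvBlockBits (block : List Char) : List Int :=
  (List.range 4).foldl (fun bits i =>
    let k : Int := if i < block.length then ((block.getD i ' ').toNat : Int) else 0
    bits ++ pvSlotBits k) []

def getKeyBytes_alt (key : String) : List (List Int) :=
  let cs := key.toList
  (PySem.List.pyRange 0 (cs.length : Int) 4).foldl (fun out st =>
    out ++ [pvBlockBits (PySem.List.slice cs (some st) (some (st + 4)))]) []

-- ===== PRECONDITION & SPEC =====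
def Spec_getKeyBytes (key : String) (out : List (List Int)) : Prop := out = getKeyBytes_alt key
instance (key : String) (out : List (List Int)) : Decidable (Spec_getKeyBytes key out) := by unfold Spec_getKeyBytes; infer_instance

-- ===== CLAIM (what is proved, stated in full; the proofs are below) =====
def Claim_equal_getKeyBytes : Prop := ∀ (key : String), Dom_getKeyBytes key → Spec_getKeyBytes key (getKeyBytes key)

-- ===== LEMMAS AND PROOFS =====

-- B's repeated-divmod slot equals A's per-bit division by the recomputed power of two.
theorem slot_eq (k : Int) :
    pvSlotBits k = (List.range 16).map (fun j => PySem.Int.mod (PySem.Int.floordiv k (pvPowv j)) 2) := by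
  simp [pvSlotBits, List.range_succ, pvPowv, PySem.List.pyRange_neg_one]
  norm_num [Int.ediv_ediv_of_nonneg]

-- A's array-filling strToBt in flatMap form, for blocks of length ≤ 4.
theorem strToBt_eq (s : List Char) (h : s.length ≤ 4) :
    strToBt s = (List.range 4).flatMap (fun i =>
      (List.range 16).map (fun j =>
        PySem.Int.mod (PySem.Int.floordiv
          (if i < s.length then ((s.getD i ' ').toNat : Int) else 0) (pvPowv j)) 2)) := by
  match s with
  | [] => simp [strToBt, List.range_succ, show List.range' 0 4 = [0,1,2,3] from rfl]
  | [a] => simp [strToBt, List.range_succ, show List.range' 1 3 = [1,2,3] from rfl]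
  | [a, b] => simp [strToBt, List.range_succ, show List.range' 2 2 = [2,3] from rfl]
  | [a, b, c] => simp [strToBt, List.range_succ, show List.range' 3 1 = [3] from rfl]
  | [a, b, c, d] => simp [strToBt, List.range_succ]
  | _ :: _ :: _ :: _ :: _ :: _ => simp at h; omega

theorem blockBits_eq (s : List Char) (h : s.length ≤ 4) : pvBlockBits s = strToBt s := by
  rw [strToBt_eq s h]
  simp only [pvBlockBits, PySem.List.foldl_append_eq_flatMap, List.nil_append]
  refine List.flatMap_congr ?_  -- placeholder; fixed below if name differs
  intro i _
  split
  · exact slot_eq _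
  · exact slot_eq 0

theorem getKeyBytes_spec : Claim_equal_getKeyBytes := by
  intro key _
  show getKeyBytes key = getKeyBytes_alt key
  unfold getKeyBytes getKeyBytes_alt
  simp only [PySem.List.foldl_append_singleton_eq_map, List.nil_append]
  rw [PySem.List.pyRange_of_pos 0 _ (by norm_num), List.map_map]
  set cs := key.toList with hcs
  set n := cs.length with hn
  have hm : (if (0:Int) < (n:Int) then (((n:Int) - 0 + 4 - 1) / 4).toNat else 0) = (n + 3) / 4 := by
    split <;> omega
  rw [hm]
  have hB : ∀ k, ((fun st => pvBlockBits (PySem.List.slice cs (some st) (some (st + 4)))) ∘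
        fun k : Nat => (0:Int) + 4 * (k:Nat)) k = strToBt ((cs.drop (4*k)).take 4) := by
    intro k
    simp only [Function.comp]
    rw [show ((0:Int) + 4 * (k:Nat)) = ((4*k : Nat) : Int) from by push_cast; ring]
    rw [show (((4*k : Nat) : Int) + 4) = ((4*k + 4 : Nat) : Int) from by push_cast; ring]
    rw [PySem.List.slice_natCast, show 4*k + 4 - 4*k = 4 from by omega]
    exact blockBits_eq ((cs.drop (4*k)).take 4) (by simp)
  rw [List.map_congr_left (fun k _ => hB k)]
  have hA : ∀ i, (fun i : Nat => strToBt (PySem.List.slice cs (some ((i * 4 : Nat) : Int))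
        (some (((i + 1) * 4 : Nat) : Int)))) i = strToBt ((cs.drop (4*i)).take 4) := by
    intro i
    simp only [PySem.List.slice_natCast]
    rw [show (i+1)*4 - i*4 = 4 from by omega, show i*4 = 4*i from by omega]
  rw [List.map_congr_left (fun i _ => hA i)]
  rcases Nat.eq_zero_or_pos (n % 4) with h0 | hpos
  · rw [if_neg (by omega)]
    rw [show (n + 3) / 4 = n / 4 from by omega]
  · rw [if_pos (by omega)]
    rw [show (n + 3) / 4 = n / 4 + 1 from by omega, List.range_succ, List.map_append]
    congr 1
    simp only [List.map_cons, List.map_nil]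
    congr 1
    rw [PySem.List.slice_natCast]
    rw [show n / 4 * 4 = 4 * (n / 4) from by omega]
    rw [List.take_of_length_le (by simp; omega), List.take_of_length_le (by simp; omega)]
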